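-- pv_equiv track=rewrite | github.com/1ce2k/iti0102-2023 | KT/kt1/exam.py | has_seven
-- ===== SOURCE A (Python) =====
-- def has_seven(nums):
--     """
--     Whether the list has three 7s and no repeated consecutive elements.
--
--     Given a list if ints, return True if the value 7 appears in the list exactly 3 times
--     and no consecutive elements have the same value.
--
--     has_seven([1, 2, 3]) => False
--     has_seven([7, 1, 7, 7]) => False
--     has_seven([7, 1, 7, 1, 7]) => True
--     has_seven([7, 1, 7, 1, 1, 7]) => False
--     """
--     count = 0
--     for i in range(len(nums)):
--         if nums[i] == 7:
--             count += 1
--         if i < len(nums) - 1 and nums[i] == nums[i + 1]: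
--             return False
--     return count == 3
-- ===== SOURCE B (Python) =====
-- def has_seven(nums):
--     # Run-length encode the list, then judge the encoding:
--     # every run must have length 1 (no consecutive duplicates) and
--     # exactly three runs must carry the value 7 (then 7 occurs exactly 3 times).
--     runs = []
--     for x in nums:
--         if runs and runs[-1][0] == x:
--             runs[-1] = (x, runs[-1][1] + 1)
--         else:
--             runs.append((x, 1))
--     return all(c == 1 for _, c in runs) and sum(1 for v, _ in runs if v == 7) == 3
-- ===== Notes on version B (the rewrite author's own statement) =====
-- stated objective: alternative
-- what changed: B builds an intermediate run-length encoding of the list and judges that structure (all run lengths 1, exactly three runs of value 7), instead of A's fused indexed loop with an early return.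
import Mathlib
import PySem

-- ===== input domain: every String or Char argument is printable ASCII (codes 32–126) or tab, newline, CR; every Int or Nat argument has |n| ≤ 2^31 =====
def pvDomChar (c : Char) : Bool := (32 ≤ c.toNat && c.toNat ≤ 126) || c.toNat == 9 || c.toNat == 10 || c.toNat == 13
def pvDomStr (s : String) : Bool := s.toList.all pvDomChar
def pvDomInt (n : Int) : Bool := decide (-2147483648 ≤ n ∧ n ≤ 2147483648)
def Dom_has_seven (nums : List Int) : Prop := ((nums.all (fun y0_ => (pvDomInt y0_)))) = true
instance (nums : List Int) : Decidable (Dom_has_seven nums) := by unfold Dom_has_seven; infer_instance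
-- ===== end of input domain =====

-- B replaces A's fused indexed early-exit loop by a run-length encoding of the list
-- which is then judged (all run lengths 1, exactly three runs of value 7); same cost.
-- ===== PORT A =====
-- loop 'for i in range(len(nums))' with accumulator count and early 'return False';
-- the indices i and i+1 are in range whenever read, so List.getD is exact there.
def has_seven_loopA (nums : List Int) (i : Nat) (count : Int) : Bool :=
  if i < nums.length then
    let count := if nums.getD i 0 = 7 then count + 1 else count
    if i < nums.length - 1 ∧ nums.getD i 0 = nums.getD (i+1) 0 then false
    else has_seven_loopA nums (i+1) count
  else decide (count = 3)
termination_by nums.length - i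

def has_seven (nums : List Int) : Bool := has_seven_loopA nums 0 0

-- ===== PORT B =====
-- one step of the run-length-encoding loop body: merge x into the most recent run
-- or start a new run.  The Python list 'runs' is appended at the end and its last
-- element is inspected, so the fold keeps the runs in REVERSED order (head = most
-- recent run) and the port reverses at the end to denote the same Python list.
def rleStep (runs : List (Int × Int)) (x : Int) : List (Int × Int) :=
  match runs with
  | (v, c) :: rest => if v = x then (x, c + 1) :: rest else (x, 1) :: (v, c) :: rest
  | [] => [(x, 1)]

def has_seven_alt (nums : List Int) : Bool :=
  let runs := (nums.foldl rleStep []).reverse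
  (runs.all (fun p => p.2 == 1)) && (runs.countP (fun p => p.1 == 7) == 3)

-- ===== PRECONDITION & SPEC =====
def Spec_has_seven (nums : List Int) (out : Bool) : Prop := out = has_seven_alt nums
instance (nums : List Int) (out : Bool) : Decidable (Spec_has_seven nums out) := by unfold Spec_has_seven; infer_instance

-- ===== CLAIM (what is proved, stated in full; the proofs are below) =====
def Claim_equal_has_seven : Prop := ∀ (nums : List Int), Dom_has_seven nums → Spec_has_seven nums (has_seven nums)

-- ===== LEMMAS AND PROOFS =====

-- loop characterisation: from index i, A's loop returns
-- 'all remaining adjacent pairs distinct AND count + #7s in the suffix = 3'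
theorem loopA_char (nums : List Int) (i : Nat) (count : Int) :
    has_seven_loopA nums i count =
      (((nums.drop i).zip (nums.drop (i+1))).all (fun p => p.1 != p.2) &&
        decide (count + ((nums.drop i).count (7 : Int) : Int) = 3)) := by
  fun_induction has_seven_loopA nums i count with
  | case1 i count h hdup =>
    obtain ⟨hi1, heq⟩ := hdup
    have h1 : i + 1 < nums.length := by omega
    rw [List.drop_eq_getElem_cons h, List.drop_eq_getElem_cons h1]
    simp only [List.zip_cons_cons, List.all_cons]
    have : nums[i] = nums[i+1] := by
      rwa [List.getD_eq_getElem nums 0 h, List.getD_eq_getElem nums 0 h1] at heq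
    simp [this]
  | case2 i count h count2 hdup ih =>
    rw [ih]
    have hc2 : count2 = if nums[i]'h = (7 : Int) then count + 1 else count := by
      show (if nums.getD i 0 = (7 : Int) then count + 1 else count) = _
      rw [List.getD_eq_getElem nums 0 h]
    by_cases h1 : i + 1 < nums.length
    · rw [List.drop_eq_getElem_cons h, List.drop_eq_getElem_cons h1]
      simp only [List.zip_cons_cons, List.all_cons, List.count_cons]
      have hne : ¬ nums[i] = nums[i+1] := by
        intro hc
        exact hdup ⟨by omega, by
          rw [List.getD_eq_getElem nums 0 h, List.getD_eq_getElem nums 0 h1]; exact hc⟩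
      have hb : (nums[i] != nums[i+1]) = true := by simp [hne]
      rw [hb, Bool.true_and, hc2]
      congr 1
      rw [decide_eq_decide]
      by_cases h7 : nums[i] = (7 : Int)
      · simp [h7]; omega
      · simp [h7]
    · have hlen : i + 1 = nums.length := by omega
      have hd1 : nums.drop (i+1) = [] := by simp [hlen]
      rw [List.drop_eq_getElem_cons h, hd1]
      simp only [List.zip_nil_right, List.zip_nil_left, List.all_nil, Bool.true_and,
        List.count_cons, List.count_nil]
      rw [hc2, decide_eq_decide]
      by_cases h7 : nums[i] = (7 : Int) <;> simp [h7]
  | case3 i count h =>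
    have : nums.drop i = [] := by simp; omega
    simp [this]

-- fold invariant 1: with head run (v, c), c ≥ 1, 'all run lengths 1' of the fold
-- result equals 'accumulator all ones AND v::xs has no equal adjacent pair'
theorem fold_allOnes (xs : List Int) (v c : Int) (rest : List (Int × Int)) (hc : 1 ≤ c) :
    (List.foldl rleStep ((v, c) :: rest) xs).all (fun p => p.2 == 1) =
      ((((v, c) :: rest).all (fun p => p.2 == 1)) &&
        (((v :: xs).zip xs).all (fun p => p.1 != p.2))) := by
  induction xs generalizing v c rest with
  | nil => simp
  | cons x xs ih =>
    simp only [List.foldl_cons, rleStep]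
    by_cases h : v = x
    · subst h
      rw [if_pos rfl, ih v (c + 1) rest (by omega)]
      have h1 : ¬ (c + 1 = (1 : Int)) := by omega
      simp [h1]
    · rw [if_neg h, ih x 1 ((v, c) :: rest) (by omega)]
      have hb : (v != x) = true := by simp [h]
      simp only [List.all_cons, List.zip_cons_cons, hb]
      by_cases h2 : c = (1 : Int) <;> simp [h2]

-- fold invariant 2: when v::xs has no equal adjacent pair, every element of xs
-- starts a fresh run, so the number of 7-runs grows by the number of 7s in xs
theorem fold_cnt (xs : List Int) (v c : Int) (rest : List (Int × Int))
    (h : ((v :: xs).zip xs).all (fun p => p.1 != p.2) = true) :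
    (List.foldl rleStep ((v, c) :: rest) xs).countP (fun p => p.1 == 7) =
      ((v, c) :: rest).countP (fun p => p.1 == 7) + xs.count (7 : Int) := by
  induction xs generalizing v c rest with
  | nil => simp
  | cons x xs ih =>
    simp only [List.zip_cons_cons, List.all_cons, Bool.and_eq_true, bne_iff_ne] at h
    obtain ⟨hvx, h'⟩ := h
    simp only [List.foldl_cons, rleStep, if_neg hvx]
    rw [ih x 1 ((v, c) :: rest) h']
    simp only [List.countP_cons, List.count_cons]
    by_cases h7 : x = (7 : Int) <;> simp [h7] <;> omega

-- ===== VERDICT (by name: the statement is the Claim_ definition above) =====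
theorem has_seven_spec : Claim_equal_has_seven := by
  intro nums _
  unfold Spec_has_seven has_seven has_seven_alt
  rw [loopA_char]
  simp only [Nat.zero_add, List.drop_zero, List.drop_one, List.all_reverse,
    List.countP_reverse]
  cases nums with
  | nil => decide
  | cons x xs =>
    simp only [List.foldl_cons, rleStep, List.tail_cons]
    rw [fold_allOnes xs x 1 [] (by omega)]
    by_cases hz : ((x :: xs).zip xs).all (fun p => p.1 != p.2) = true
    · rw [fold_cnt xs x 1 [] hz]
      simp only [hz, Bool.true_and, Bool.and_true, List.all_cons, List.all_nil,
        List.countP_cons, List.countP_nil, List.count_cons]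
      rw [Bool.eq_iff_iff]
      simp only [Bool.and_eq_true, decide_eq_true_eq, beq_iff_eq]
      simp only [true_and]
      split_ifs with h7 <;> constructor <;> intro h <;> omega
    · simp only [Bool.not_eq_true] at hz
      simp [hz]
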